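-- pv_equiv track=rewrite | github.com/lowell1/Algorithms | rock_paper_scissors/rps.py | recurse
-- ===== SOURCE A (Python) =====
-- def recurse(n, idx):
--   new_combos = []
--
--   if idx == n - 1:
--     arr = ["rock"] * n
--     for text in ["rock", "paper", "scissors"]:
--       new_combos.append(arr[:-1] + [text])
--   else:
--     last_combos = recurse(n, idx + 1)
--     for text in ["rock", "paper", "scissors"]:
--       for combo in last_combos:
--         new_combos.append(combo[:idx] + [text] + combo[idx + 1:])
--
--   return new_combos
-- ===== SOURCE B (Python) =====
-- import itertools
--
-- def recurse(n, idx):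
--     return [["rock"] * idx + list(p)
--             for p in itertools.product(["rock", "paper", "scissors"], repeat=n - idx)]
-- ===== Notes on version B (the rewrite author's own statement) =====
-- stated objective: idiomatic
-- what changed: Replaces the per-position recursion with slice-splicing by a direct lexicographic Cartesian product (itertools.product, leftmost position slowest) prefixed with idx rocks; Pre_ excludes idx > n-1 (A recurses forever, RecursionError) and the corner n >= 1 with idx < 0, where A's overlapping negative slices return accidental duplicated/overlong rows no caller could specify.
import Mathlib
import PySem

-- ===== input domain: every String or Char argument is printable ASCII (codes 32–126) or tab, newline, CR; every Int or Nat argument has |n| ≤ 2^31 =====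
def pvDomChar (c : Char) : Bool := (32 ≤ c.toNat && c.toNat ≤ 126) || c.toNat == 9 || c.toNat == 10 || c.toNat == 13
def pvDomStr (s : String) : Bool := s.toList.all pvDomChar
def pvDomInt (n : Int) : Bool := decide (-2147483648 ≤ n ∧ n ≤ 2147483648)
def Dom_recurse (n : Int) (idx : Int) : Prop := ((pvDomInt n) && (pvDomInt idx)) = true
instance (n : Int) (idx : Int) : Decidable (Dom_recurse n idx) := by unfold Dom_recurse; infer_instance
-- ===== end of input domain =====

-- B replaces A's per-position recursion with a direct Cartesian product (itertools.product,
-- leftmost position slowest) prefixed by idx "rock"s: idiomatic, same output order.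

-- ===== PORT A =====
-- literal transliteration of Source A; the final 'else []' is only a totality guard for the
-- region idx > n - 1, where the Python recursion never terminates (RecursionError; outside Pre_).
def recurse (n : Int) (idx : Int) : List (List String) :=
  if idx = n - 1 then
    ["rock", "paper", "scissors"].foldl
      (fun acc text => acc ++ [PySem.List.slice (PySem.List.pyRepeat ["rock"] n) none (some (-1)) ++ [text]]) []
  else if idx < n - 1 then
    let last_combos := recurse n (idx + 1)
    ["rock", "paper", "scissors"].foldl
      (fun acc text =>
        last_combos.foldl
          (fun acc combo =>
            acc ++ [PySem.List.slice combo none (some idx) ++ [text] ++ PySem.List.slice combo (some (idx + 1)) none])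
          acc) []
  else []
termination_by (n - 1 - idx).toNat
decreasing_by omega

-- ===== PORT B =====
-- hand port of itertools.product(["rock","paper","scissors"], repeat=k) for k ≥ 0:
-- exact (leftmost slot varies slowest); Python raises ValueError for negative repeat (outside Pre_).
def prodRPS : Nat → List (List String)
  | 0 => [[]]
  | k + 1 => ["rock", "paper", "scissors"].flatMap (fun o => (prodRPS k).map (fun p => o :: p))

def recurse_alt (n : Int) (idx : Int) : List (List String) :=
  (prodRPS (n - idx).toNat).map (fun p => PySem.List.pyRepeat ["rock"] idx ++ p)

-- ===== PRECONDITION & SPEC =====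
-- Pre_ excludes idx > n - 1, where the Python A never reaches its base case (RecursionError),
-- and the corner n ≥ 1 with idx < 0, where A's overlapping negative slices return accidental
-- duplicated/overlong rows no caller could specify (B returns the distinct product rows there).
def Pre_recurse (n : Int) (idx : Int) : Prop := idx ≤ n - 1 ∧ (0 ≤ idx ∨ n ≤ 0)
instance (n : Int) (idx : Int) : Decidable (Pre_recurse n idx) := by unfold Pre_recurse; infer_instance
def pvWitness_recurse : Int × Int := (3, 0)

def Spec_recurse (n : Int) (idx : Int) (out : List (List String)) : Prop := out = recurse_alt n idx
instance (n : Int) (idx : Int) (out : List (List String)) : Decidable (Spec_recurse n idx out) := by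
  unfold Spec_recurse; infer_instance

-- ===== CLAIM =====
def Claim_equal_recurse : Prop :=
  ∀ (n : Int) (idx : Int), Dom_recurse n idx → Pre_recurse n idx → Spec_recurse n idx (recurse n idx)

-- ===== LEMMAS AND PROOFS =====

-- A on the valid range (0 ≤ idx = n - 1 - k): product rows prefixed by idx rocks
theorem recurse_pos : ∀ (k : Nat) (n idx : Int), 0 ≤ idx → idx + k = n - 1 →
    recurse n idx = (prodRPS (k + 1)).map (fun p => List.replicate idx.toNat "rock" ++ p) := by
  intro k
  induction k with
  | zero =>
    intro n idx h0 hk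
    have hidx : idx = n - 1 := by omega
    rw [recurse.eq_def, if_pos hidx]
    simp [List.foldl, prodRPS, PySem.List.pyRepeat_singleton, PySem.List.slice_to_neg_one,
      List.dropLast_replicate, show n.toNat - 1 = idx.toNat from by omega]
  | succ k ih =>
    intro n idx h0 hk
    rw [recurse.eq_def, if_neg (by omega : ¬ (idx = n - 1)), if_pos (by omega : idx < n - 1)]
    rw [ih n (idx + 1) (by omega) (by omega)]
    simp only [PySem.List.foldl_append_singleton_eq_map, PySem.List.foldl_append_eq_flatMap,
      List.nil_append, List.map_map]
    rw [show prodRPS (k + 1 + 1) = ["rock", "paper", "scissors"].flatMap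
        (fun o => (prodRPS (k + 1)).map (fun p => o :: p)) from rfl]
    simp only [List.map_flatMap, List.map_map]
    congr 1
    funext t
    congr 1
    funext p
    simp only [Function.comp]
    rw [PySem.List.slice_to _ h0, PySem.List.slice_from _ (by omega : (0:Int) ≤ idx + 1)]
    rw [List.take_append_of_le_length (by simp), List.take_replicate, List.drop_left' (by simp)]
    simp

-- every row of prodRPS k has length k (used by the n ≤ 0 case)
theorem prodRPS_length : ∀ (k : Nat) (p : List String), p ∈ prodRPS k → p.length = k := by
  intro k
  induction k with
  | zero => intro p hp; simp [prodRPS] at hp; simp [hp]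
  | succ k ih =>
    intro p hp
    simp only [prodRPS, List.mem_flatMap, List.mem_map] at hp
    obtain ⟨o, _, q, hq, rfl⟩ := hp
    simp [ih q hq]

-- A for n ≤ 0 (idx = n - 1 - k < 0): both slices are vacuous, so A builds exactly prodRPS
theorem recurse_nonpos : ∀ (k : Nat) (n idx : Int), n ≤ 0 → idx + k = n - 1 →
    recurse n idx = prodRPS (k + 1) := by
  intro k
  induction k with
  | zero =>
    intro n idx hn hk
    have hidx : idx = n - 1 := by omega
    rw [recurse.eq_def, if_pos hidx]
    have hrep : PySem.List.pyRepeat ["rock"] n = ([] : List String) := by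
      rw [PySem.List.pyRepeat_singleton, show n.toNat = 0 by omega, List.replicate_zero]
    simp [List.foldl, prodRPS, hrep, PySem.List.slice_to_neg_one]
  | succ k ih =>
    intro n idx hn hk
    rw [recurse.eq_def, if_neg (by omega : ¬ (idx = n - 1)), if_pos (by omega : idx < n - 1)]
    rw [ih n (idx + 1) hn (by omega)]
    simp only [PySem.List.foldl_append_singleton_eq_map, PySem.List.foldl_append_eq_flatMap,
      List.nil_append]
    rw [show prodRPS (k + 1 + 1) = ["rock", "paper", "scissors"].flatMap
        (fun o => (prodRPS (k + 1)).map (fun p => o :: p)) from rfl]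
    congr 1
    funext t
    apply List.map_congr_left
    intro c hc
    have hlen : c.length = k + 1 := prodRPS_length (k + 1) c hc
    obtain ⟨m1, hm1, hp1⟩ : ∃ m : Nat, idx = -(m : Int) ∧ 0 < m := ⟨(-idx).toNat, by omega, by omega⟩
    obtain ⟨m2, hm2, hp2⟩ : ∃ m : Nat, idx + 1 = -(m : Int) ∧ 0 < m := ⟨(-(idx+1)).toNat, by omega, by omega⟩
    rw [hm2, hm1, PySem.List.slice_to_neg_natCast _ _ hp1, PySem.List.slice_from_neg_natCast _ _ hp2]
    rw [show c.length - m1 = 0 by omega, show c.length - m2 = 0 by omega]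
    simp

-- ===== VERDICT =====
theorem recurse_spec : Claim_equal_recurse := by
  intro n idx _ hpre
  obtain ⟨hle, hcase⟩ := hpre
  unfold Spec_recurse recurse_alt
  rcases hcase with hi | hn
  · have hk : idx + ((n - 1 - idx).toNat : Int) = n - 1 := by omega
    rw [recurse_pos (n - 1 - idx).toNat n idx hi hk,
      show (n - idx).toNat = (n - 1 - idx).toNat + 1 by omega, PySem.List.pyRepeat_singleton]
  · have hk : idx + ((n - 1 - idx).toNat : Int) = n - 1 := by omega
    have hineg : idx < 0 := by omega
    rw [recurse_nonpos (n - 1 - idx).toNat n idx hn hk,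
      show (n - idx).toNat = (n - 1 - idx).toNat + 1 by omega, PySem.List.pyRepeat_singleton,
      show idx.toNat = 0 by omega]
    simp
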